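-- pv_equiv track=rewrite | github.com/hemanth1403/D-S-A | Recursion & BackTracking/SkipAalphabet.py | skipApla
-- ===== SOURCE A (Python) =====
-- def skipApla(s, ind, skip, res=""):
--     if(ind == len(s)):
--         return res
--     # if()
--     if(ind == s.index(skip)):
--         for i in range(ind, len(s)):
--             if(s[i]==skip[-1]):
--                 break
--         return skipApla(s, i+1, skip, res)
--     else:
--         res += s[ind]
--         return skipApla(s, ind+1, skip, res)
-- ===== SOURCE B (Python) =====
-- def skipApla(s, ind, skip, res=""):
--     if ind == len(s):
--         return res
--     p = s.index(skip)
--     if ind <= p: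
--         j = len(s) - 1
--         for i in range(p, len(s)):
--             if s[i] == skip[-1]:
--                 j = i
--                 break
--         return res + s[ind:p] + s[j + 1:]
--     return res + s[ind:]
-- ===== Notes on version B (the rewrite author's own statement) =====
-- stated objective: faster
-- what changed: Replaces A's per-character recursion (which recomputes s.index(skip) on every call) with a single closed-form computation: find the occurrence once and build the answer from two slices, so no recursion and no repeated substring search.
-- outside the precondition, e.g. on skipApla('abc', -2, 'b', ''): A returns 'bcac', B returns 'c'
import Mathlib
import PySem

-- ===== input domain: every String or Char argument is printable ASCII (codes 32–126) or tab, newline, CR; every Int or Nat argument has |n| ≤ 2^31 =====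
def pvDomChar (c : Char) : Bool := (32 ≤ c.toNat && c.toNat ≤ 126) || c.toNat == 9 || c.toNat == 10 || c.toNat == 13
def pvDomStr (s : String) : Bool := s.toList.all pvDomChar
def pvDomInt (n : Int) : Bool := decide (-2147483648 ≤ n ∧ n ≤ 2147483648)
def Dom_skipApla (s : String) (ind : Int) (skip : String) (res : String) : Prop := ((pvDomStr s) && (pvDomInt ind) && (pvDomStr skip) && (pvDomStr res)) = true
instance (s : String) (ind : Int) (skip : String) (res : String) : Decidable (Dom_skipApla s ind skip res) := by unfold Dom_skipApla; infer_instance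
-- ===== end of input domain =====

-- B replaces A's per-character recursion (which recomputes s.index(skip) each call) with one
-- find + two slices; equivalence is proved on the natural domain 0 ≤ ind ≤ len(s) (Pre_ below).


-- ===== PORT A =====
-- A's inner 'for i in range(ind, len(s)): if s[i]==skip[-1]: break': the loop variable i keeps
-- its last value (the first matching index, or the final range element if no break fires).
-- Indices fed to this loop are always in range, so pyGetD's default is never used.
def innerLoopA (s : List Char) (last : Char) : List Int → Int → Int
  | [], i => i
  | j :: rest, _ => if PySem.List.pyGetD s j ' ' = last then j else innerLoopA s last rest j

-- needed by the port's termination proof (cited in decreasing_by)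
lemma innerLoopA_ge (s : List Char) (last : Char) :
    ∀ (js : List Int) (a i : Int), (∀ j ∈ js, a ≤ j) → a ≤ i → a ≤ innerLoopA s last js i
  | [], _, _, _, hi => hi
  | j :: rest, a, _, hjs, _ => by
    unfold innerLoopA
    split
    · exact hjs j (List.mem_cons_self ..)
    · exact innerLoopA_ge s last rest a j (fun x hx => hjs x (List.mem_cons_of_mem _ hx))
        (hjs j (List.mem_cons_self ..))

-- transliteration of A: the recursion over ind, with Option none exactly where Python raises
-- (ValueError from s.index(skip), IndexError from skip[-1] or s[ind])
def skipAplaAux (s skip : List Char) (ind : Int) (res : List Char) : Option (List Char) :=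
  if hend : ind = (s.length : Int) then some res
  else
    if hfound : PySem.Chars.find s skip = -1 then none   -- s.index(skip) raises ValueError
    else if hhit : ind = PySem.Chars.find s skip then
      match PySem.List.pyGet? skip (-1) with
      -- skip[-1]: Python evaluates it in the loop's first iteration; evaluated up front here,
      -- exact since the range(ind, len(s)) loop is nonempty whenever this branch runs
      | none => none
      | some last =>
        skipAplaAux s skip (innerLoopA s last (PySem.List.pyRange ind (s.length : Int) 1) ind + 1) res
    else
      match hc : PySem.List.pyGet? s ind with            -- s[ind]; IndexError out of range
      | none => none
      | some c => skipAplaAux s skip (ind + 1) (res ++ [c])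
termination_by ((s.length : Int) - ind).toNat
decreasing_by
  · have hle := PySem.Chars.find_le_length s skip
    rw [← hhit] at hle
    have key : ∀ i : Int, ind ≤ i → ((s.length : Int) - (i + 1)).toNat < ((s.length : Int) - ind).toNat := by
      intro i h; omega
    exact key _ (innerLoopA_ge s last _ ind ind
      (fun j hj => ((PySem.List.mem_pyRange_one).mp hj).1) le_rfl)
  · simp [PySem.List.pyGet?, PySem.List.pyIdx?] at hc
    split_ifs at hc <;> first | omega | simp_all

def skipApla (s : String) (ind : Int) (skip : String) (res : String) : String :=
  ((skipAplaAux s.toList skip.toList ind res.toList).map String.ofList).getD ""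
  -- none (= a Python exception) is excluded by Pre_; the default is never read there

-- ===== PORT B =====
-- B's inner 'j = len(s)-1; for i in range(p, len(s)): if s[i]==skip[-1]: j = i; break'
def innerScanB (s : List Char) (last : Char) : List Int → Int → Int
  | [], j => j
  | i :: rest, j => if PySem.List.pyGetD s i ' ' = last then i else innerScanB s last rest j

def skipApla_alt (s : String) (ind : Int) (skip : String) (res : String) : String :=
  if ind = (s.toList.length : Int) then res
  else if PySem.Chars.find s.toList skip.toList = -1 then ""  -- p = s.index(skip) raises ValueError
  else if ind ≤ PySem.Chars.find s.toList skip.toList then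
    match PySem.List.pyGet? skip.toList (-1) with
    -- skip[-1]: Python evaluates it in the loop's first iteration; evaluated up front here,
    -- exact whenever the loop runs (always inside Pre_, where skip occurs in s)
    | none => ""
    | some last =>
      let j := innerScanB s.toList last
        (PySem.List.pyRange (PySem.Chars.find s.toList skip.toList) (s.toList.length : Int) 1)
        ((s.toList.length : Int) - 1)
      String.ofList (res.toList
        ++ PySem.List.slice s.toList (some ind) (some (PySem.Chars.find s.toList skip.toList))
        ++ PySem.List.slice s.toList (some (j + 1)) none)     -- res + s[ind:p] + s[j+1:]
  else
    String.ofList (res.toList ++ PySem.List.slice s.toList (some ind) none)  -- res + s[ind:]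

-- ===== PRECONDITION & SPEC =====
-- Pre_ restricts to the natural domain 0 ≤ ind ≤ len(s) (A also accepts -len(s) ≤ ind < 0 via
-- Python's negative-index wraparound — see the cite) and excludes the inputs where A raises:
-- skip absent from s with ind < len(s) (ValueError), empty skip with ind = 0 (IndexError),
-- ind out of range (IndexError).
def Pre_skipApla (s : String) (ind : Int) (skip : String) (res : String) : Prop :=
  0 ≤ ind ∧ ind ≤ (s.toList.length : Int) ∧
  (ind = (s.toList.length : Int) ∨
    (PySem.Chars.isIn skip.toList s.toList = true ∧ (skip.toList ≠ [] ∨ 1 ≤ ind)))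
instance (s : String) (ind : Int) (skip : String) (res : String) : Decidable (Pre_skipApla s ind skip res) := by unfold Pre_skipApla; infer_instance

def pvWitness_skipApla : String × Int × String × String := ("abcd", 0, "bc", "x")

def Spec_skipApla (s : String) (ind : Int) (skip : String) (res : String) (out : String) : Prop := out = skipApla_alt s ind skip res
instance (s : String) (ind : Int) (skip : String) (res : String) (out : String) : Decidable (Spec_skipApla s ind skip res out) := by unfold Spec_skipApla; infer_instance

-- ===== CLAIM (what is proved, stated in full; the proofs are below) =====
def Claim_equal_skipApla : Prop := ∀ (s : String) (ind : Int) (skip : String) (res : String), Dom_skipApla s ind skip res → Pre_skipApla s ind skip res → Spec_skipApla s ind skip res (skipApla s ind skip res)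

-- ===== LEMMAS AND PROOFS =====

-- a found occurrence of a nonempty pattern starts strictly before the end
lemma find_lt_length (s skip : List Char) (hp : PySem.Chars.find s skip ≠ -1) (hn : skip ≠ []) :
    PySem.Chars.find s skip < (s.length : Int) := by
  have h1 := PySem.Chars.neg_one_le_find s skip
  have h0 : 0 ≤ PySem.Chars.find s skip := by omega
  obtain ⟨hpre, -⟩ := PySem.Chars.find_spec h0
  have hlen := hpre.length_le
  simp [List.length_drop] at hlen
  have : 0 < skip.length := List.length_pos_iff.mpr hn
  have h2 := PySem.Chars.find_le_length s skip
  omega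


lemma innerLoopA_le (s : List Char) (last : Char) :
    ∀ (js : List Int) (b i : Int), (∀ j ∈ js, j ≤ b) → i ≤ b → innerLoopA s last js i ≤ b
  | [], _, _, _, hi => hi
  | j :: rest, b, _, hjs, _ => by
    unfold innerLoopA
    split
    · exact hjs j (List.mem_cons_self ..)
    · exact innerLoopA_le s last rest b j (fun x hx => hjs x (List.mem_cons_of_mem _ hx))
        (hjs j (List.mem_cons_self ..))

-- A's loop and B's loop on the same index list agree when B's default is the list's last element
lemma scan_eq (s : List Char) (last : Char) :
    ∀ (js : List Int) (i0 d : Int), js.getLast? = some d →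
      innerLoopA s last js i0 = innerScanB s last js d
  | [], _, _, h => by simp at h
  | j :: rest, i0, d, h => by
    unfold innerLoopA innerScanB
    split
    · rfl
    · cases rest with
      | nil =>
        simp at h
        subst h
        rfl
      | cons r rs =>
        exact scan_eq s last (r :: rs) j d (by rw [← h]; rfl)

lemma pyGet?_in (xs : List Char) (i : Int) (h0 : 0 ≤ i) (h1 : i < (xs.length : Int))
    (h2 : i.toNat < xs.length) : PySem.List.pyGet? xs i = some xs[i.toNat] := by
  simp [PySem.List.pyGet?, PySem.List.pyIdx?, h0, h1]

-- pass-through: once ind is strictly past the first occurrence, A copies the rest of s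
lemma passA (s skip : List Char) (ind : Int) (res : List Char)
    (hfound : PySem.Chars.find s skip ≠ -1)
    (hgt : PySem.Chars.find s skip < ind) (h0 : 0 ≤ ind) (hle : ind ≤ (s.length : Int)) :
    skipAplaAux s skip ind res = some (res ++ s.drop ind.toNat) := by
  rw [skipAplaAux]
  by_cases hend : ind = (s.length : Int)
  · rw [dif_pos hend]
    simp [show ind.toNat = s.length by omega]
  · rw [dif_neg hend, dif_neg hfound,
      dif_neg (show ¬ ind = PySem.Chars.find s skip by omega)]
    have h2 : ind.toNat < s.length := by omega
    split
    · next hc => rw [pyGet?_in s ind h0 (by omega) h2] at hc; exact absurd hc (by simp)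
    · next c hc =>
      rw [pyGet?_in s ind h0 (by omega) h2] at hc
      obtain rfl : s[ind.toNat] = c := Option.some_inj.mp hc
      rw [passA s skip (ind + 1) (res ++ [s[ind.toNat]]) hfound (by omega) (by omega) (by omega)]
      rw [List.drop_eq_getElem_cons h2, show (ind + 1).toNat = ind.toNat + 1 by omega]
      simp
termination_by ((s.length : Int) - ind).toNat
decreasing_by omega

-- the hit step at ind = find, expressed with B's scan
lemma hitA (s skip : List Char) (res : List Char) (last : Char)
    (hfound : PySem.Chars.find s skip ≠ -1) (hne : skip ≠ [])
    (hlast : PySem.List.pyGet? skip (-1) = some last) :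
    skipAplaAux s skip (PySem.Chars.find s skip) res =
      some (res ++ s.drop (innerScanB s last
        (PySem.List.pyRange (PySem.Chars.find s skip) (s.length : Int) 1)
        ((s.length : Int) - 1) + 1).toNat) := by
  have hnn : 0 ≤ PySem.Chars.find s skip := by
    have := PySem.Chars.neg_one_le_find s skip; omega
  have hlt := find_lt_length s skip hfound hne
  have hrange : (PySem.List.pyRange (PySem.Chars.find s skip) (s.length : Int) 1).getLast?
      = some ((s.length : Int) - 1) := by
    rw [show (s.length : Int) = ((s.length : Int) - 1) + 1 by ring,
      PySem.List.pyRange_one_succ_right (by omega)]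
    rw [show ((s.length : Int) - 1 + 1) = (s.length : Int) by ring]
    exact List.getLast?_concat
  have hscan := scan_eq s last
    (PySem.List.pyRange (PySem.Chars.find s skip) (s.length : Int) 1)
    (PySem.Chars.find s skip) ((s.length : Int) - 1) hrange
  have hgej : PySem.Chars.find s skip ≤ innerScanB s last
      (PySem.List.pyRange (PySem.Chars.find s skip) (s.length : Int) 1)
      ((s.length : Int) - 1) := by
    rw [← hscan]
    exact innerLoopA_ge s last _ _ _
      (fun j hj => ((PySem.List.mem_pyRange_one).mp hj).1) le_rfl
  have hlej : innerScanB s last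
      (PySem.List.pyRange (PySem.Chars.find s skip) (s.length : Int) 1)
      ((s.length : Int) - 1) ≤ (s.length : Int) - 1 := by
    rw [← hscan]
    exact innerLoopA_le s last _ _ _
      (fun j hj => by have := ((PySem.List.mem_pyRange_one).mp hj).2; omega) (by omega)
  rw [skipAplaAux, dif_neg (by omega), dif_neg hfound, dif_pos rfl, hlast]
  show skipAplaAux s skip (innerLoopA s last
      (PySem.List.pyRange (PySem.Chars.find s skip) (s.length : Int) 1)
      (PySem.Chars.find s skip) + 1) res = _
  rw [hscan]
  exact passA s skip _ res hfound (by omega) (by omega) (by omega)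

-- approach: from any 0 ≤ ind ≤ find, A collects s[ind:find] and then behaves as at the hit
lemma approachA (s skip : List Char) (last : Char) (ind : Int) (res : List Char)
    (hfound : PySem.Chars.find s skip ≠ -1) (hne : skip ≠ [])
    (hlast : PySem.List.pyGet? skip (-1) = some last)
    (h0 : 0 ≤ ind) (hip : ind ≤ PySem.Chars.find s skip) :
    skipAplaAux s skip ind res =
      some (res ++ ((s.drop ind.toNat).take ((PySem.Chars.find s skip).toNat - ind.toNat)) ++
        s.drop (innerScanB s last
          (PySem.List.pyRange (PySem.Chars.find s skip) (s.length : Int) 1)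
          ((s.length : Int) - 1) + 1).toNat) := by
  have hlt := find_lt_length s skip hfound hne
  by_cases heq : ind = PySem.Chars.find s skip
  · subst heq
    simpa using hitA s skip res last hfound hne hlast
  · have hindlt : ind < PySem.Chars.find s skip := by omega
    have h2 : ind.toNat < s.length := by omega
    rw [skipAplaAux, dif_neg (by omega), dif_neg hfound, dif_neg heq]
    split
    · next hc => rw [pyGet?_in s ind h0 (by omega) h2] at hc; exact absurd hc (by simp)
    · next c hc =>
      rw [pyGet?_in s ind h0 (by omega) h2] at hc
      obtain rfl : s[ind.toNat] = c := Option.some_inj.mp hc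
      rw [approachA s skip last (ind + 1) (res ++ [s[ind.toNat]]) hfound hne hlast (by omega) (by omega)]
      rw [List.drop_eq_getElem_cons h2, show (ind + 1).toNat = ind.toNat + 1 by omega,
        show (PySem.Chars.find s skip).toNat - ind.toNat
          = ((PySem.Chars.find s skip).toNat - (ind.toNat + 1)) + 1 by omega,
        List.take_succ_cons]
      simp
termination_by ((PySem.Chars.find s skip) - ind).toNat
decreasing_by omega

-- ===== VERDICT (by name: the statement is the Claim_ definition above) =====
theorem skipApla_spec : Claim_equal_skipApla := by
  unfold Claim_equal_skipApla
  intro s ind skip res _ hpre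
  obtain ⟨h0, hle, hor⟩ := hpre
  unfold Spec_skipApla skipApla skipApla_alt
  simp only []
  by_cases hend : ind = (s.toList.length : Int)
  · rw [skipAplaAux, dif_pos hend, if_pos hend]
    simp
  · have hin : PySem.Chars.isIn skip.toList s.toList = true ∧
        (skip.toList ≠ [] ∨ 1 ≤ ind) := by
      rcases hor with h | h
      · exact absurd h hend
      · exact h
    have hp0 : 0 ≤ PySem.Chars.find s.toList skip.toList :=
      (PySem.Chars.find_nonneg_iff _ _).mpr ((PySem.Chars.isIn_iff_infix _ _).mp hin.1)
    have hfound : PySem.Chars.find s.toList skip.toList ≠ -1 := by omega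
    by_cases hsk : skip.toList = []
    · have hp : PySem.Chars.find s.toList skip.toList = 0 := by
        rw [hsk]; exact PySem.Chars.find_nil s.toList
      have hind1 : 1 ≤ ind := by
        rcases hin.2 with h | h
        · exact absurd hsk h
        · exact h
      rw [passA s.toList skip.toList ind res.toList hfound (by omega) h0 hle]
      rw [if_neg hend, if_neg hfound, if_neg (by omega)]
      simp [PySem.List.slice_from _ h0]
    · have hlt := find_lt_length s.toList skip.toList hfound hsk
      obtain ⟨last, hlast⟩ : ∃ last, PySem.List.pyGet? skip.toList (-1) = some last :=
        ⟨skip.toList.getLast hsk, by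
          rw [PySem.List.pyGet?_neg_one]; exact List.getLast?_eq_some_getLast hsk⟩
      by_cases hip : ind ≤ PySem.Chars.find s.toList skip.toList
      · rw [approachA s.toList skip.toList last ind res.toList hfound hsk hlast h0 hip]
        rw [if_neg hend, if_neg hfound, if_pos hip, hlast]
        simp only []
        have hgej : PySem.Chars.find s.toList skip.toList ≤ innerScanB s.toList last
            (PySem.List.pyRange (PySem.Chars.find s.toList skip.toList) (s.toList.length : Int) 1)
            ((s.toList.length : Int) - 1) := by
          rw [← scan_eq s.toList last _ (PySem.Chars.find s.toList skip.toList) _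
            (by rw [show (s.toList.length : Int) = ((s.toList.length : Int) - 1) + 1 by ring,
                  PySem.List.pyRange_one_succ_right (by omega)]
                rw [show ((s.toList.length : Int) - 1 + 1) = (s.toList.length : Int) by ring]
                exact List.getLast?_concat)]
          exact innerLoopA_ge s.toList last _ _ _
            (fun j hj => ((PySem.List.mem_pyRange_one).mp hj).1) le_rfl
        rw [PySem.List.slice_toNat s.toList h0 hp0,
          PySem.List.slice_from s.toList (show (0:Int) ≤ _ + 1 by omega)]
        simp
      · rw [not_le] at hip
        rw [passA s.toList skip.toList ind res.toList hfound hip h0 hle]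
        rw [if_neg hend, if_neg hfound, if_neg (by omega)]
        simp [PySem.List.slice_from _ h0]
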